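-- pv_equiv track=rewrite | github.com/SekiAyumi/HandwrittenTextAlign | toda_crop_chars_from_scan.py | find_continuous_lengths
-- ===== SOURCE A (Python) =====
-- def find_continuous_lengths(input_list):
--     continuous_lengths = []
--     current_length = 0
--
--     for num in input_list:
--         if num > 0:
--             current_length += 1
--         else:
--             if current_length > 0:
--                 continuous_lengths.append(current_length)
--             current_length = 0
--
--     if current_length > 0:
--         continuous_lengths.append(current_length)
--
--     return continuous_lengths
-- ===== SOURCE B (Python) =====
-- def find_continuous_lengths(input_list):
--     # Two-pointer run scanner: find each maximal run of positives directly
--     # and record its length, instead of maintaining a running counter.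
--     res = []
--     i = 0
--     n = len(input_list)
--     while i < n:
--         if input_list[i] > 0:
--             j = i
--             while j < n and input_list[j] > 0:
--                 j += 1
--             res.append(j - i)
--             i = j
--         else:
--             i += 1
--     return res
-- ===== Notes on version B (the rewrite author's own statement) =====
-- stated objective: alternative
-- what changed: Replaced the accumulator fold with its separate tail-flush branch by a two-pointer scanner that jumps over each maximal positive run and emits its length directly.
import Mathlib
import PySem

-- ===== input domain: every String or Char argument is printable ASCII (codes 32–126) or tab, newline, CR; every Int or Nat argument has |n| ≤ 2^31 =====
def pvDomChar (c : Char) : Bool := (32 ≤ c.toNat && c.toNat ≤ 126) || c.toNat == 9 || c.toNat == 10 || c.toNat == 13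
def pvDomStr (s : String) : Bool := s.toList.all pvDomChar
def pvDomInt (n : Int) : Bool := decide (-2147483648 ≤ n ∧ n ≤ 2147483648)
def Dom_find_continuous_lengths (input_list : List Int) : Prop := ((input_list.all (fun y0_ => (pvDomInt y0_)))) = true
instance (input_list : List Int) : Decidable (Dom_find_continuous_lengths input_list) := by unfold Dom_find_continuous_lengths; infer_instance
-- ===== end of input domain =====

-- B replaces A's running counter + tail-flush with a scanner that jumps over each maximal positive run (alternative decomposition; same cost).

-- ===== PORT A =====
-- A: fold carrying (lengths so far, current run counter), then flush the tail run.
def find_continuous_lengths (input_list : List Int) : List Int :=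
  let st := input_list.foldl
    (fun (p : List Int × Int) num =>
      if num > 0 then (p.1, p.2 + 1)
      else if p.2 > 0 then (p.1 ++ [p.2], 0) else (p.1, 0))
    ([], 0)
  if st.2 > 0 then st.1 ++ [st.2] else st.1

-- ===== PORT B =====
-- B: the inner `while j < n and lst[j] > 0` advance is the takeWhile/dropWhile span;
-- the outer while loop is the structural recursion.
def find_continuous_lengths_alt : List Int → List Int
  | [] => []
  | x :: xs =>
    if x > 0 then
      (1 + ((xs.takeWhile (fun y => decide (y > 0))).length : Int))
        :: find_continuous_lengths_alt (xs.dropWhile (fun y => decide (y > 0)))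
    else
      find_continuous_lengths_alt xs
termination_by l => l.length
decreasing_by
  · exact Nat.lt_succ_of_le (List.length_dropWhile_le _ _)
  · exact Nat.lt_succ_self _

-- ===== PRECONDITION & SPEC =====
def Spec_find_continuous_lengths (input_list : List Int) (out : List Int) : Prop := out = find_continuous_lengths_alt input_list
instance (input_list : List Int) (out : List Int) : Decidable (Spec_find_continuous_lengths input_list out) := by unfold Spec_find_continuous_lengths; infer_instance

-- ===== CLAIM (what is proved, stated in full; the proofs are below) =====
def Claim_equal_find_continuous_lengths : Prop := ∀ (input_list : List Int), Dom_find_continuous_lengths input_list → Spec_find_continuous_lengths input_list (find_continuous_lengths input_list)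

-- ===== LEMMAS AND PROOFS =====

-- A's fold+flush, unrolled into a recursive helper for the induction.
def pvGoA : List Int → List Int → Int → List Int
  | [], acc, c => if c > 0 then acc ++ [c] else acc
  | n :: ns, acc, c =>
    if n > 0 then pvGoA ns acc (c + 1)
    else if c > 0 then pvGoA ns (acc ++ [c]) 0 else pvGoA ns acc 0

lemma pvGoA_eq_fold (l : List Int) : ∀ (acc : List Int) (c : Int),
    pvGoA l acc c =
      (let st := l.foldl
        (fun (p : List Int × Int) num =>
          if num > 0 then (p.1, p.2 + 1)
          else if p.2 > 0 then (p.1 ++ [p.2], 0) else (p.1, 0))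
        (acc, c)
      if st.2 > 0 then st.1 ++ [st.2] else st.1) := by
  induction l with
  | nil => intro acc c; simp [pvGoA]
  | cons x xs ih =>
    intro acc c
    simp only [pvGoA, List.foldl_cons]
    by_cases h1 : x > 0
    · simp [h1, ih]
    · by_cases h2 : c > 0 <;> simp [h1, h2, ih]

lemma pvGoA_append (l : List Int) : ∀ (acc : List Int) (c : Int),
    pvGoA l acc c = acc ++ pvGoA l [] c := by
  induction l with
  | nil => intro acc c; by_cases h : c > 0 <;> simp [pvGoA, h]
  | cons x xs ih =>
    intro acc c
    by_cases h1 : x > 0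
    · simp only [pvGoA, if_pos h1]
      exact ih acc (c + 1)
    · by_cases h2 : c > 0
      · simp only [pvGoA, if_neg h1, if_pos h2]
        rw [ih (acc ++ [c]) 0, ih ([] ++ [c]) 0, List.append_assoc]
        simp
      · simp only [pvGoA, if_neg h1, if_neg h2]
        exact ih acc 0

lemma pvGoA_key (l : List Int) :
    (pvGoA l [] 0 = find_continuous_lengths_alt l) ∧
    (∀ c : Int, 0 ≤ c →
      pvGoA l [] (c + 1) =
        (c + 1 + ((l.takeWhile (fun y => decide (y > 0))).length : Int))
          :: find_continuous_lengths_alt (l.dropWhile (fun y => decide (y > 0)))) := by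
  induction l with
  | nil =>
    constructor
    · simp [pvGoA, find_continuous_lengths_alt]
    · intro c hc
      simp [pvGoA, find_continuous_lengths_alt]
      omega
  | cons x xs ih =>
    constructor
    · by_cases h1 : x > 0
      · have := ih.2 0 (le_refl 0)
        simp only [pvGoA, if_pos h1, zero_add] at this ⊢
        rw [this, find_continuous_lengths_alt, if_pos h1]
      · simp [pvGoA, h1, ih.1, find_continuous_lengths_alt]
    · intro c hc
      by_cases h1 : x > 0
      · have := ih.2 (c + 1) (by omega)
        simp only [pvGoA, if_pos h1] at this ⊢
        rw [this]
        simp [h1]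
        ring_nf
      · have hc1 : c + 1 > 0 := by omega
        simp only [pvGoA, if_neg h1, if_pos hc1]
        rw [pvGoA_append, ih.1]
        simp [h1, find_continuous_lengths_alt]

-- ===== VERDICT (by name: the statement is the Claim_ definition above) =====
theorem find_continuous_lengths_spec : Claim_equal_find_continuous_lengths := by
  intro l _
  show find_continuous_lengths l = find_continuous_lengths_alt l
  rw [find_continuous_lengths, ← pvGoA_eq_fold, (pvGoA_key l).1]
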